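-- pv_equiv track=rewrite | github.com/weekend-at-bernies/SimpleXmlTree | SimpleXmlTree.py | getIndentStr
-- ===== SOURCE A (Python) =====
-- def getIndentStr(indentwidth, indentcount):
--     s1 = ""
--     s2 = ""
--     i = 0
--     while i < indentwidth:
--         s1 += " "
--         i += 1
--     i = 0
--     while i < indentcount:
--         s2 += s1
--         i += 1
--     return s2
-- ===== SOURCE B (Python) =====
-- def getIndentStr(indentwidth, indentcount):
--     return " " * (max(indentwidth, 0) * max(indentcount, 0))
-- ===== Notes on version B (the rewrite author's own statement) =====
-- stated objective: simpler
-- what changed: Replaced the two char-by-char/block-by-block while-loops with a single closed-form string multiply of the product of the clamped-at-zero arguments.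
import Mathlib
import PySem

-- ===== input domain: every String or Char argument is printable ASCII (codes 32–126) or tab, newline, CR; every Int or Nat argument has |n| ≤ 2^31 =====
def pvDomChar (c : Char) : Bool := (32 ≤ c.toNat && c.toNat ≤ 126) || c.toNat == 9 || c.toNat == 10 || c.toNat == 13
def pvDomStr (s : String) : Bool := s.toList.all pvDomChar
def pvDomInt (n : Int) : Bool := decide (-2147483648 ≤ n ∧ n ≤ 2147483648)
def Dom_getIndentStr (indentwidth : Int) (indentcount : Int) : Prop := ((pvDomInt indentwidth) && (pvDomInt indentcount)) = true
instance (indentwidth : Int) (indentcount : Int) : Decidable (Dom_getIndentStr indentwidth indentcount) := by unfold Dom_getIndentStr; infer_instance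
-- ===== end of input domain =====

-- B replaces A's two accumulation loops with one closed-form multiply " " * (max(w,0)*max(c,0)); equal return value, simpler.
-- ===== PORT A =====
-- while i < indentwidth: s1 += " "; i += 1
def pvLoopA1 (indentwidth : Int) (i : Int) (s1 : String) : String :=
  if i < indentwidth then pvLoopA1 indentwidth (i + 1) (s1 ++ " ") else s1
termination_by (indentwidth - i).toNat
decreasing_by omega

-- while i < indentcount: s2 += s1; i += 1
def pvLoopA2 (indentcount : Int) (s1 : String) (i : Int) (s2 : String) : String :=
  if i < indentcount then pvLoopA2 indentcount s1 (i + 1) (s2 ++ s1) else s2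
termination_by (indentcount - i).toNat
decreasing_by omega

def getIndentStr (indentwidth : Int) (indentcount : Int) : String :=
  let s1 := pvLoopA1 indentwidth 0 ""
  pvLoopA2 indentcount s1 0 ""

-- ===== PORT B =====
-- " " * n  on the ints' product, clamped at zero
def getIndentStr_alt (indentwidth : Int) (indentcount : Int) : String :=
  String.ofList (List.replicate (max indentwidth 0 * max indentcount 0).toNat ' ')

-- ===== PRECONDITION & SPEC =====
def Spec_getIndentStr (indentwidth : Int) (indentcount : Int) (out : String) : Prop := out = getIndentStr_alt indentwidth indentcount
instance (indentwidth : Int) (indentcount : Int) (out : String) : Decidable (Spec_getIndentStr indentwidth indentcount out) := by unfold Spec_getIndentStr; infer_instance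

-- ===== CLAIM (what is proved, stated in full; the proofs are below) =====
def Claim_equal_getIndentStr : Prop := ∀ (indentwidth : Int) (indentcount : Int), Dom_getIndentStr indentwidth indentcount → Spec_getIndentStr indentwidth indentcount (getIndentStr indentwidth indentcount)

-- ===== LEMMAS AND PROOFS =====
lemma pvLoopA1_eq (w i : Int) (l : List Char) :
    pvLoopA1 w i (String.ofList l) = String.ofList (l ++ List.replicate (w - i).toNat ' ') := by
  by_cases h : i < w
  · rw [pvLoopA1]
    simp only [h, if_true]
    have ht : (" " : String).toList = [' '] := by simp
    have hsp : (" " : String) = String.ofList [' '] := by rw [← ht, String.ofList_toList]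
    rw [hsp, ← String.ofList_append, pvLoopA1_eq]
    have hn : (w - i).toNat = (w - (i + 1)).toNat + 1 := by omega
    rw [hn, List.replicate_succ, List.append_assoc]
    rfl
  · rw [pvLoopA1]
    simp only [h, if_false]
    have : (w - i).toNat = 0 := by omega
    simp [this]
termination_by (w - i).toNat
decreasing_by omega

lemma pvLoopA2_eq (c i : Int) (m : Nat) (l : List Char) :
    pvLoopA2 c (String.ofList (List.replicate m ' ')) i (String.ofList l) =
      String.ofList (l ++ List.replicate ((c - i).toNat * m) ' ') := by
  by_cases h : i < c
  · rw [pvLoopA2]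
    simp only [h, if_true]
    rw [← String.ofList_append, pvLoopA2_eq]
    have hn : (c - i).toNat * m = m + (c - (i + 1)).toNat * m := by
      have : (c - i).toNat = (c - (i + 1)).toNat + 1 := by omega
      rw [this]; ring
    rw [hn, List.append_assoc, ← List.replicate_add]
  · rw [pvLoopA2]
    simp only [h, if_false]
    have : (c - i).toNat = 0 := by omega
    simp [this]
termination_by (c - i).toNat
decreasing_by omega

-- ===== VERDICT =====
theorem getIndentStr_spec : Claim_equal_getIndentStr := by
  intro w c _
  unfold Spec_getIndentStr getIndentStr getIndentStr_alt
  have he : ("" : String) = String.ofList [] := String.ofList_nil.symm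
  rw [he, pvLoopA1_eq]
  simp only [List.nil_append]
  rw [pvLoopA2_eq]
  simp only [List.nil_append]
  congr 2
  have hw : max w 0 = ((w.toNat : Nat) : Int) := by omega
  have hc : max c 0 = ((c.toNat : Nat) : Int) := by omega
  rw [hw, hc, ← Nat.cast_mul, Int.toNat_natCast]
  have h1 : (c - 0).toNat = c.toNat := by omega
  have h2 : (w - 0).toNat = w.toNat := by omega
  rw [h1, h2, Nat.mul_comm]
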